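-- pv_equiv track=rewrite | github.com/guillsil/Algo1Essaya-Python | parcialitos/tercer_parcialito/211-recursion.py | eliminar_pares2
-- ===== SOURCE A (Python) =====
-- def eliminar_pares2(lista):
--     nueva_lista = []
--     if len(lista) == 0:
--         return lista
--     else:
--         if lista[0] % 2 == 0:
--             return eliminar_pares2(lista[1:])
--         else:
--             return eliminar_pares2(lista[1:]) + [lista[0]]
-- ===== SOURCE B (Python) =====
-- def eliminar_pares2(lista):
--     res = []
--     for x in lista:
--         if x % 2 != 0:
--             res.append(x)
--     res.reverse()
--     return res
-- ===== Notes on version B (the rewrite author's own statement) =====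
-- stated objective: simpler
-- what changed: Replaced the head/tail recursion with back appends by a single iterative pass collecting odd elements followed by an in-place reverse.
import Mathlib
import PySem

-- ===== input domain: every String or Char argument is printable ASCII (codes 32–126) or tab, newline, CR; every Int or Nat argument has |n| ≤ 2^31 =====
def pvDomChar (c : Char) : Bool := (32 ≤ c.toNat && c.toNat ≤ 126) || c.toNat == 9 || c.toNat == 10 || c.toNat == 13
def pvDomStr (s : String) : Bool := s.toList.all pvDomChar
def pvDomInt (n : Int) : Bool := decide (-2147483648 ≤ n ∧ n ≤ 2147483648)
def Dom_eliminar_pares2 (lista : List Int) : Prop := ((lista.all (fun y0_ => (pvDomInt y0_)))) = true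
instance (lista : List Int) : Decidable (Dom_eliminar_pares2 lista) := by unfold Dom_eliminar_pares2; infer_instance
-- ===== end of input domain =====

-- B replaces the head/tail recursion by one iterative pass collecting odds plus a reverse (simpler/faster).


-- ===== PORT A =====
def eliminar_pares2 (lista : List Int) : List Int :=
  match lista with
  | [] => lista
  | x :: rest =>
      if PySem.Int.mod x 2 = 0 then eliminar_pares2 rest
      else eliminar_pares2 rest ++ [x]

-- ===== PORT B =====
def eliminar_pares2_alt (lista : List Int) : List Int :=
  (lista.foldl (fun res x => if PySem.Int.mod x 2 ≠ 0 then res ++ [x] else res) []).reverse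

-- ===== PRECONDITION & SPEC =====
def Spec_eliminar_pares2 (lista : List Int) (out : List Int) : Prop := out = eliminar_pares2_alt lista
instance (lista : List Int) (out : List Int) : Decidable (Spec_eliminar_pares2 lista out) := by unfold Spec_eliminar_pares2; infer_instance

-- ===== CLAIM (what is proved, stated in full; the proofs are below) =====
def Claim_equal_eliminar_pares2 : Prop := ∀ (lista : List Int), Dom_eliminar_pares2 lista → Spec_eliminar_pares2 lista (eliminar_pares2 lista)

-- ===== LEMMAS AND PROOFS =====

-- ===== VERDICT (by name: the statement is the Claim_ definition above) =====
lemma eliminar_pares2_eq_filter_reverse (lista : List Int) :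
    eliminar_pares2 lista = (lista.filter (fun x => PySem.Int.mod x 2 ≠ 0)).reverse := by
  induction lista with
  | nil => rfl
  | cons x rest ih =>
      by_cases h : PySem.Int.mod x 2 = 0
      · have hd : (decide (PySem.Int.mod x 2 ≠ 0)) = false := by rw [h]; decide
        simp only [eliminar_pares2, ih, List.filter_cons, if_pos h, hd]
        simp
      · have hd : (decide (PySem.Int.mod x 2 ≠ 0)) = true := decide_eq_true h
        simp only [eliminar_pares2, ih, List.filter_cons, if_neg h, hd]
        simp

theorem eliminar_pares2_spec : Claim_equal_eliminar_pares2 := by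
  intro lista _
  unfold Spec_eliminar_pares2 eliminar_pares2_alt
  rw [PySem.List.foldl_append_ite_eq_filter, eliminar_pares2_eq_filter_reverse]
  simp
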